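-- pv_equiv track=rewrite | github.com/ElverJavierMorenoSanchez/Actividad1_CalcularLaMatrizInversa | main.py | calMAdjunta
-- ===== SOURCE A (Python) =====
-- def calMAdjunta(arr):
--     for i in range(2):
--         for j in range(2):
--             if(i == 0 and i==j):
--                 aux = arr[i][j]
--                 arr[i][j] = arr[i+1][j+1]
--                 arr[i + 1][j + 1] = aux
--             elif(i == 0 and i!=j):
--                 aux = arr[i][j]
--                 arr[i][j] = - arr[i + 1][j - 1]
--                 arr[i + 1][j - 1] = - aux
--
--     return arr
-- ===== SOURCE B (Python) =====
-- def calMAdjunta(arr):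
--     # Cofactor-matrix algorithm: entry (i, j) becomes (-1)**(i+j) times the
--     # minor of (i, j), computed from a snapshot of the matrix (for a 2x2 the
--     # minor of (i, j) is the single entry arr[1-i][1-j]).
--     # Mutates arr in place, like A.
--     m = [[arr[0][0], arr[0][1]], [arr[1][0], arr[1][1]]]
--     for i in range(2):
--         for j in range(2):
--             arr[i][j] = (-1) ** (i + j) * m[1 - i][1 - j]
--     return arr
-- ===== Notes on version B (the rewrite author's own statement) =====
-- stated objective: alternative
-- what changed: Replaces A's in-place swap loop (branch dispatch with aux temporaries) by the general cofactor-matrix algorithm: snapshot the matrix, then recompute each entry (i,j) as (-1)**(i+j) times its minor taken from the snapshot.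
import Mathlib
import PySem

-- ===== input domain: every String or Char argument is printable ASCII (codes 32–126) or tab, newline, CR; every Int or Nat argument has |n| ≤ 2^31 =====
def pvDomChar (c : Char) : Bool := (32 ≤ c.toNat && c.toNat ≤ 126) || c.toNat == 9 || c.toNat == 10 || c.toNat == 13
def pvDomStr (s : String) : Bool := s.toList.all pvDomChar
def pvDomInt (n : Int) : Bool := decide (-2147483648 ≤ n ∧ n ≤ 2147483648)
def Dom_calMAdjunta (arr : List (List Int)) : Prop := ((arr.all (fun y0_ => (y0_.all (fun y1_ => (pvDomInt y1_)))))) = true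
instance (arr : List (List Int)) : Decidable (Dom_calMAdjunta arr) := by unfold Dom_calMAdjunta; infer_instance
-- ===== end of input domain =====

-- B replaces A's in-place swap loop by the general cofactor-matrix algorithm: a snapshot of
-- the matrix is taken first, and each entry (i,j) is recomputed as (-1)^(i+j) times its 2x2
-- minor from the snapshot ('alternative'). Both Pythons mutate arr in place; the equivalence
-- proved is about the return value.


-- ===== PORT A =====
-- one iteration of A's inner loop body (totalised with pyGetD/pySetD; in-range under Pre_)
def calMAdjuntaStep (arr : List (List Int)) (i j : Int) : List (List Int) :=
  if i = 0 ∧ i = j then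
    let aux := PySem.List.pyGetD (PySem.List.pyGetD arr i []) j 0
    let arr := PySem.List.pySetD arr i
      (PySem.List.pySetD (PySem.List.pyGetD arr i []) j
        (PySem.List.pyGetD (PySem.List.pyGetD arr (i+1) []) (j+1) 0))
    PySem.List.pySetD arr (i+1)
      (PySem.List.pySetD (PySem.List.pyGetD arr (i+1) []) (j+1) aux)
  else if i = 0 ∧ i ≠ j then
    let aux := PySem.List.pyGetD (PySem.List.pyGetD arr i []) j 0
    let arr := PySem.List.pySetD arr i
      (PySem.List.pySetD (PySem.List.pyGetD arr i []) j
        (- PySem.List.pyGetD (PySem.List.pyGetD arr (i+1) []) (j-1) 0))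
    PySem.List.pySetD arr (i+1)
      (PySem.List.pySetD (PySem.List.pyGetD arr (i+1) []) (j-1) (- aux))
  else arr

def calMAdjunta (arr : List (List Int)) : List (List Int) :=
  (PySem.List.pyRange 0 2 1).foldl (fun arr i =>
    (PySem.List.pyRange 0 2 1).foldl (fun arr j => calMAdjuntaStep arr i j) arr) arr

-- ===== PORT B =====
def calMAdjunta_alt (arr : List (List Int)) : List (List Int) :=
  -- snapshot m = [[arr[0][0], arr[0][1]], [arr[1][0], arr[1][1]]]
  let m : List (List Int) :=
    [[PySem.List.pyGetD (PySem.List.pyGetD arr 0 []) 0 0,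
      PySem.List.pyGetD (PySem.List.pyGetD arr 0 []) 1 0],
     [PySem.List.pyGetD (PySem.List.pyGetD arr 1 []) 0 0,
      PySem.List.pyGetD (PySem.List.pyGetD arr 1 []) 1 0]]
  -- arr[i][j] = (-1)**(i+j) * m[1-i][1-j]  (exponent i+j ≥ 0, ported via .toNat)
  (PySem.List.pyRange 0 2 1).foldl (fun arr i =>
    (PySem.List.pyRange 0 2 1).foldl (fun arr j =>
      PySem.List.pySetD arr i
        (PySem.List.pySetD (PySem.List.pyGetD arr i []) j
          ((-1 : Int) ^ (i + j).toNat *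
           PySem.List.pyGetD (PySem.List.pyGetD m (1 - i) []) (1 - j) 0))) arr) arr

-- ===== PRECONDITION & SPEC =====
-- Pre_ excludes exactly the inputs on which A raises IndexError: fewer than two rows,
-- or one of the first two rows shorter than two entries.
def Pre_calMAdjunta (arr : List (List Int)) : Prop :=
  2 ≤ arr.length ∧ 2 ≤ (arr.headD []).length ∧ 2 ≤ ((arr.drop 1).headD []).length
instance (arr : List (List Int)) : Decidable (Pre_calMAdjunta arr) := by unfold Pre_calMAdjunta; infer_instance
def pvWitness_calMAdjunta : List (List Int) := [[1, 2], [3, 4]]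

def Spec_calMAdjunta (arr : List (List Int)) (out : List (List Int)) : Prop := out = calMAdjunta_alt arr
instance (arr : List (List Int)) (out : List (List Int)) : Decidable (Spec_calMAdjunta arr out) := by unfold Spec_calMAdjunta; infer_instance

-- ===== CLAIM (what is proved, stated in full; the proofs are below) =====
def Claim_equal_calMAdjunta : Prop := ∀ (arr : List (List Int)), Dom_calMAdjunta arr → Pre_calMAdjunta arr → Spec_calMAdjunta arr (calMAdjunta arr)

-- ===== LEMMAS AND PROOFS =====

-- ===== VERDICT (by name: the statement is the Claim_ definition above) =====
set_option maxHeartbeats 1000000 in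
theorem calMAdjunta_spec : Claim_equal_calMAdjunta := by
  intro arr _ hpre
  unfold Pre_calMAdjunta at hpre
  match arr, hpre with
  | (a :: b :: t0) :: (c :: d :: t1) :: rest, _ =>
      show calMAdjunta _ = calMAdjunta_alt _
      simp only [calMAdjunta, calMAdjunta_alt,
        show PySem.List.pyRange 0 2 1 = [0, 1] from by decide, List.foldl]
      simp [calMAdjuntaStep, pysem]
  | [], h => simp at h
  | [r0], h => simp at h
  | [] :: r1 :: rest, h => simp at h
  | [x] :: r1 :: rest, h => simp at h
  | r0 :: [] :: rest, h => simp at h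
  | r0 :: [x] :: rest, h => simp at h
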